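-- pv_equiv track=rewrite | github.com/EvanSun96/codesignal | robinhoodprep.py | mutateMatrix
-- ===== SOURCE A (Python) =====
-- def rotateMatrix(a):
--   N = len(a)
--   matrix = [ list(reversed([row[i] for row in a])) for i in range(N)]
--   return matrix
--
-- def diagonalMain(a):
--   matrix = [[row[i] for row in a] for i in range(len(a))]
--   return matrix
--
-- def diagonalSecond(a):
--   return list(reversed(rotateMatrix(a)))
--
-- def mutateMatrix(matrix, queries):
--   for q in queries:
--     if q == 0:
--       matrix = rotateMatrix(matrix)
--     elif q == 2:
--       matrix = diagonalMain(matrix)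
--     elif q == 1:
--       matrix = diagonalSecond(matrix)
--   return matrix
-- ===== SOURCE B (Python) =====
-- def mutateMatrix(matrix, queries):
--     # Compose the queries as dihedral-group index maps, then apply the net
--     # transform once: out[i][j] = matrix[p][q] for the composed (p, q).
--     s = a = b = False   # net map: (i,j) -> swap? -> flip row? flip col?
--     eff = False
--     for q in queries:
--         if q == 0:          # rotate 90° clockwise: (i,j) -> (n-1-j, i)
--             s2, a2, b2 = True, True, False
--         elif q == 2:        # main-diagonal transpose: (i,j) -> (j, i)
--             s2, a2, b2 = True, False, False
--         elif q == 1:        # anti-diagonal transpose: (i,j) -> (n-1-j, n-1-i)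
--             s2, a2, b2 = True, True, True
--         else:
--             continue
--         eff = True
--         if s:
--             s, a, b = s != s2, a != b2, b != a2
--         else:
--             s, a, b = s != s2, a != a2, b != b2
--     if not eff:
--         return matrix
--     n = len(matrix)
--     out = []
--     for i in range(n):
--         row = []
--         for j in range(n):
--             p, c = (j, i) if s else (i, j)
--             if a:
--                 p = n - 1 - p
--             if b:
--                 c = n - 1 - c
--             row.append(matrix[p][c])
--         out.append(row)
--     return out
-- ===== Notes on version B (the rewrite author's own statement) =====
-- stated objective: alternative
-- what changed: Instead of materialising a new matrix for every query, B composes all queries into a single dihedral-group index map (swap/flip-row/flip-col booleans) in one pass over queries and applies the net transform to the matrix once.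
import Mathlib
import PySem

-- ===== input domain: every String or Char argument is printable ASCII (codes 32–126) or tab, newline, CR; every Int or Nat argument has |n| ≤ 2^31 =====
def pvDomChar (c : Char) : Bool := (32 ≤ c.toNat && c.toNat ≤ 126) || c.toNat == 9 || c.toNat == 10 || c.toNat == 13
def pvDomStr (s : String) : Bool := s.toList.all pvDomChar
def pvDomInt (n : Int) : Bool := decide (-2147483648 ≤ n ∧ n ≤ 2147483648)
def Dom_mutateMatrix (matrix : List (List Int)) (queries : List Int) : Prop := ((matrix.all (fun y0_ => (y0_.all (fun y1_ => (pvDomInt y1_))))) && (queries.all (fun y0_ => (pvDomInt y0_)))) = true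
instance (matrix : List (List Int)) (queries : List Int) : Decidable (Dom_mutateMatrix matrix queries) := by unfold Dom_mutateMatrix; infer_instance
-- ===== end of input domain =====

-- B composes the queries into one dihedral-group index map and applies the
-- net transform to the matrix once; same return value as A.

-- ===== PORT A =====
-- rotateMatrix: N = len(a); [ list(reversed([row[i] for row in a])) for i in range(N) ]
def rotateMatrix (a : List (List Int)) : List (List Int) :=
  (List.range a.length).map (fun (i : Nat) => (a.map (fun row => PySem.List.pyGetD row (i : Int) 0)).reverse)

-- diagonalMain: [[row[i] for row in a] for i in range(len(a))]
def diagonalMain (a : List (List Int)) : List (List Int) :=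
  (List.range a.length).map (fun (i : Nat) => a.map (fun row => PySem.List.pyGetD row (i : Int) 0))

-- diagonalSecond: list(reversed(rotateMatrix(a)))
def diagonalSecond (a : List (List Int)) : List (List Int) :=
  (rotateMatrix a).reverse

-- loop body of A's 'for q in queries'
def pvStepA (m : List (List Int)) (q : Int) : List (List Int) :=
  if q = 0 then rotateMatrix m
  else if q = 2 then diagonalMain m
  else if q = 1 then diagonalSecond m
  else m

def mutateMatrix (matrix : List (List Int)) (queries : List Int) : List (List Int) :=
  queries.foldl pvStepA matrix

-- ===== PORT B =====
-- Source B: composition of two index maps (s,a,b): the 'if s: ... else: ...' update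
def pvCompT (t u : Bool × Bool × Bool) : Bool × Bool × Bool :=
  if t.1 then (xor t.1 u.1, xor t.2.1 u.2.2, xor t.2.2 u.2.1)
  else (xor t.1 u.1, xor t.2.1 u.2.1, xor t.2.2 u.2.2)

-- Source B: one loop iteration over queries; state = ((s, a, b), eff)
def pvStepB (st : (Bool × Bool × Bool) × Bool) (q : Int) : (Bool × Bool × Bool) × Bool :=
  if q = 0 then (pvCompT st.1 (true, true, false), true)
  else if q = 2 then (pvCompT st.1 (true, false, false), true)
  else if q = 1 then (pvCompT st.1 (true, true, true), true)
  else st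

-- Source B: the index computation in the inner loop: p,c = (j,i) if s else (i,j); flips
def pvGT (n : Nat) (t : Bool × Bool × Bool) (i j : Nat) : Nat × Nat :=
  let p := if t.1 then j else i
  let c := if t.1 then i else j
  (if t.2.1 then n - 1 - p else p, if t.2.2 then n - 1 - c else c)

def mutateMatrix_alt (matrix : List (List Int)) (queries : List Int) : List (List Int) :=
  let st := queries.foldl pvStepB ((false, false, false), false)
  if st.2 = false then matrix
  else
    let n := matrix.length
    (List.range n).map (fun i => (List.range n).map (fun j =>
      PySem.List.pyGetD (PySem.List.pyGetD matrix (((pvGT n st.1 i j).1 : Nat) : Int) [])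
        (((pvGT n st.1 i j).2 : Nat) : Int) 0))

-- ===== PRECONDITION & SPEC =====
-- Pre_ excludes exactly the inputs where A raises IndexError: some query in
-- {0,1,2} together with a row shorter than the number of rows.
def Pre_mutateMatrix (matrix : List (List Int)) (queries : List Int) : Prop :=
  (∀ q ∈ queries, q ≠ 0 ∧ q ≠ 1 ∧ q ≠ 2) ∨ (∀ row ∈ matrix, matrix.length ≤ row.length)
instance (matrix : List (List Int)) (queries : List Int) : Decidable (Pre_mutateMatrix matrix queries) := by unfold Pre_mutateMatrix; infer_instance

def pvWitness_mutateMatrix : List (List Int) × List Int := ([[1, 2], [3, 4]], [0, 1, 2])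

def Spec_mutateMatrix (matrix : List (List Int)) (queries : List Int) (out : List (List Int)) : Prop := out = mutateMatrix_alt matrix queries
instance (matrix : List (List Int)) (queries : List Int) (out : List (List Int)) : Decidable (Spec_mutateMatrix matrix queries out) := by unfold Spec_mutateMatrix; infer_instance

-- ===== CLAIM (what is proved, stated in full; the proofs are below) =====
def Claim_equal_mutateMatrix : Prop := ∀ (matrix : List (List Int)) (queries : List Int), Dom_mutateMatrix matrix queries → Pre_mutateMatrix matrix queries → Spec_mutateMatrix matrix queries (mutateMatrix matrix queries)

-- ===== LEMMAS AND PROOFS =====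

-- apply the index map t once to the N×N top-left block (the shape of B's build)
def applyT (n : Nat) (t : Bool × Bool × Bool) (m : List (List Int)) : List (List Int) :=
  (List.range n).map (fun i => (List.range n).map (fun j =>
    PySem.List.pyGetD (PySem.List.pyGetD m (((pvGT n t i j).1 : Nat) : Int) [])
      (((pvGT n t i j).2 : Nat) : Int) 0))

lemma applyT_length (n : Nat) (t : Bool × Bool × Bool) (m : List (List Int)) :
    (applyT n t m).length = n := by simp [applyT]

lemma pvGT_lt {n i j : Nat} (t : Bool × Bool × Bool) (hi : i < n) (hj : j < n) :
    (pvGT n t i j).1 < n ∧ (pvGT n t i j).2 < n := by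
  obtain ⟨s, a, b⟩ := t
  simp only [pvGT]
  split_ifs <;> constructor <;> omega

lemma pvGT_comp {n i j : Nat} (t u : Bool × Bool × Bool) (hi : i < n) (hj : j < n) :
    pvGT n t (pvGT n u i j).1 (pvGT n u i j).2 = pvGT n (pvCompT t u) i j := by
  obtain ⟨s1, a1, b1⟩ := t
  obtain ⟨s2, a2, b2⟩ := u
  cases s1 <;> cases a1 <;> cases b1 <;> cases s2 <;> cases a2 <;> cases b2 <;>
    simp [pvGT, pvCompT, Prod.ext_iff] <;> omega

lemma entry_applyT {n p c : Nat} (t : Bool × Bool × Bool) (m : List (List Int))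
    (hp : p < n) (hc : c < n) :
    PySem.List.pyGetD (PySem.List.pyGetD (applyT n t m) (p : Int) []) (c : Int) 0 =
      PySem.List.pyGetD (PySem.List.pyGetD m ((pvGT n t p c).1 : Int) []) ((pvGT n t p c).2 : Int) 0 := by
  simp [applyT, List.getD_eq_getElem?_getD, hp, hc]

lemma applyT_comp (n : Nat) (t u : Bool × Bool × Bool) (m : List (List Int)) :
    applyT n u (applyT n t m) = applyT n (pvCompT t u) m := by
  unfold applyT
  refine List.map_congr_left (fun i hi => ?_)
  refine List.map_congr_left (fun j hj => ?_)
  rw [List.mem_range] at hi hj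
  obtain ⟨hp, hc⟩ := pvGT_lt u hi hj
  show PySem.List.pyGetD (PySem.List.pyGetD
      ((List.range n).map (fun i => (List.range n).map (fun j =>
        PySem.List.pyGetD (PySem.List.pyGetD m (((pvGT n t i j).1 : Nat) : Int) [])
          (((pvGT n t i j).2 : Nat) : Int) 0))) _ []) _ 0 = _
  rw [show ((List.range n).map (fun i => (List.range n).map (fun j =>
        PySem.List.pyGetD (PySem.List.pyGetD m (((pvGT n t i j).1 : Nat) : Int) [])
          (((pvGT n t i j).2 : Nat) : Int) 0))) = applyT n t m from rfl]
  rw [entry_applyT t m hp hc, pvGT_comp t u hi hj]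

lemma rotate_eq (m : List (List Int)) :
    rotateMatrix m = applyT m.length (true, true, false) m := by
  unfold rotateMatrix applyT
  refine List.map_congr_left (fun i hi => ?_)
  rw [List.mem_range] at hi
  apply List.ext_getElem (by simp)
  intro j h1 h2
  simp only [List.length_reverse, List.length_map] at h1
  simp only [List.getElem_reverse, List.getElem_map, List.getElem_range, pvGT]
  simp [List.getD_eq_getElem?_getD, List.getElem?_eq_getElem (by omega : m.length - 1 - j < m.length)]

lemma diagMain_eq (m : List (List Int)) :
    diagonalMain m = applyT m.length (true, false, false) m := by
  unfold diagonalMain applyT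
  refine List.map_congr_left (fun i hi => ?_)
  rw [List.mem_range] at hi
  apply List.ext_getElem (by simp)
  intro j h1 h2
  simp only [List.length_map] at h1
  simp only [List.getElem_map, List.getElem_range, pvGT]
  simp [List.getD_eq_getElem?_getD, List.getElem?_eq_getElem h1]

lemma diagSecond_eq (m : List (List Int)) :
    diagonalSecond m = applyT m.length (true, true, true) m := by
  unfold diagonalSecond
  rw [rotate_eq]
  apply List.ext_getElem (by simp [applyT])
  intro i h1 h2
  rw [List.length_reverse, applyT_length] at h1
  rw [List.getElem_reverse]
  unfold applyT
  simp only [List.getElem_map, List.getElem_range, List.length_map, List.length_range]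
  refine List.map_congr_left (fun j hj => ?_)
  rw [List.mem_range] at hj
  simp only [pvGT]
  congr 2

lemma compT_id (u : Bool × Bool × Bool) : pvCompT (false, false, false) u = u := by
  obtain ⟨s, a, b⟩ := u; cases s <;> cases a <;> cases b <;> decide

lemma stepA_eff (m : List (List Int)) (n : Nat) (hn : m.length = n) :
    pvStepA m 0 = applyT n (true, true, false) m ∧
    pvStepA m 2 = applyT n (true, false, false) m ∧
    pvStepA m 1 = applyT n (true, true, true) m := by
  subst hn
  exact ⟨rotate_eq m, diagMain_eq m, diagSecond_eq m⟩

lemma foldA_applyT (qs : List Int) (m0 : List (List Int)) (t : Bool × Bool × Bool) :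
    qs.foldl pvStepA (applyT m0.length t m0) =
      applyT m0.length ((qs.foldl pvStepB (t, true)).1) m0 ∧
    (qs.foldl pvStepB (t, true)).2 = true := by
  induction qs generalizing t with
  | nil => exact ⟨rfl, rfl⟩
  | cons q qs ih =>
    simp only [List.foldl_cons]
    by_cases h0 : q = 0
    · subst h0
      rw [(stepA_eff _ _ (applyT_length _ _ _)).1, applyT_comp]
      simpa [pvStepB] using ih (pvCompT t (true, true, false))
    · by_cases h2 : q = 2
      · subst h2
        rw [(stepA_eff _ _ (applyT_length _ _ _)).2.1, applyT_comp]
        simpa [pvStepB] using ih (pvCompT t (true, false, false))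
      · by_cases h1 : q = 1
        · subst h1
          rw [(stepA_eff _ _ (applyT_length _ _ _)).2.2, applyT_comp]
          simpa [pvStepB] using ih (pvCompT t (true, true, true))
        · simp only [pvStepA, pvStepB, h0, h1, h2, if_false]
          exact ih t

lemma foldA_start (qs : List Int) (m0 : List (List Int)) :
    ((qs.foldl pvStepB ((false, false, false), false)).2 = false →
      qs.foldl pvStepA m0 = m0) ∧
    ((qs.foldl pvStepB ((false, false, false), false)).2 = true →
      qs.foldl pvStepA m0 =
        applyT m0.length ((qs.foldl pvStepB ((false, false, false), false)).1) m0) := by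
  induction qs generalizing m0 with
  | nil => exact ⟨fun _ => rfl, fun h => by simp at h⟩
  | cons q qs ih =>
    simp only [List.foldl_cons]
    by_cases h0 : q = 0
    · subst h0
      have h := foldA_applyT qs m0 (true, true, false)
      simp only [pvStepB, if_true, compT_id]
      rw [(stepA_eff m0 m0.length rfl).1]
      exact ⟨fun hc => absurd (hc ▸ h.2) (by simp), fun _ => h.1⟩
    · by_cases h2 : q = 2
      · subst h2
        have h := foldA_applyT qs m0 (true, false, false)
        simp only [pvStepB, if_true, compT_id]
        rw [(stepA_eff m0 m0.length rfl).2.1]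
        exact ⟨fun hc => absurd (hc ▸ h.2) (by simp), fun _ => h.1⟩
      · by_cases h1 : q = 1
        · subst h1
          have h := foldA_applyT qs m0 (true, true, true)
          simp only [pvStepB, if_true, compT_id]
          rw [(stepA_eff m0 m0.length rfl).2.2]
          exact ⟨fun hc => absurd (hc ▸ h.2) (by simp), fun _ => h.1⟩
        · simp only [pvStepA, pvStepB, h0, h1, h2, if_false]
          exact ih m0

-- ===== VERDICT (by name: the statement is the Claim_ definition above) =====
theorem mutateMatrix_spec : Claim_equal_mutateMatrix := by
  intro matrix queries _ _
  unfold Spec_mutateMatrix mutateMatrix mutateMatrix_alt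
  have h := foldA_start queries matrix
  cases he : (queries.foldl pvStepB ((false, false, false), false)).2 with
  | false => simp only [he, if_true]; exact h.1 he
  | true => simp only [he, Bool.true_eq_false, if_false]; exact h.2 he
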